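-- pv_equiv track=rewrite | github.com/hhiyeon/algorithm | programmers/Level1/둘만의암호.py | solution
-- ===== SOURCE A (Python) =====
-- def solution(s, skip, index):
--     answer = ''
--     alpha = 'abcdefghijklmnopqrstuvwxyz'
--
--     for ch in s:
--         idx = alpha.index(ch) + 1
--         a_list = []
--
--         while len(a_list) < index:
--             if alpha[idx % 26] not in list(skip):
--                 a_list.append(alpha[idx % 26])
--             idx = idx + 1
--         answer += a_list[-1]
--     return answer
-- ===== SOURCE B (Python) =====
-- def solution(s, skip, index):
--     alpha = 'abcdefghijklmnopqrstuvwxyz'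
--     skip_set = set(skip)
--     out = []
--     for ch in s:
--         p = alpha.index(ch)
--         cyc = [alpha[(p + j) % 26] for j in range(1, 27)
--                if alpha[(p + j) % 26] not in skip_set]
--         out.append(cyc[(index - 1) % len(cyc)])
--     return ''.join(out)
-- ===== Notes on version B (the rewrite author's own statement) =====
-- stated objective: faster
-- what changed: A scans letter by letter counting `index` non-skip hits per character (O(len(s)*index)); B builds, per character, the 26-letter cyclic window of non-skip letters once and picks the target directly with (index-1) % len(cyc) modular indexing.
import Mathlib
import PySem

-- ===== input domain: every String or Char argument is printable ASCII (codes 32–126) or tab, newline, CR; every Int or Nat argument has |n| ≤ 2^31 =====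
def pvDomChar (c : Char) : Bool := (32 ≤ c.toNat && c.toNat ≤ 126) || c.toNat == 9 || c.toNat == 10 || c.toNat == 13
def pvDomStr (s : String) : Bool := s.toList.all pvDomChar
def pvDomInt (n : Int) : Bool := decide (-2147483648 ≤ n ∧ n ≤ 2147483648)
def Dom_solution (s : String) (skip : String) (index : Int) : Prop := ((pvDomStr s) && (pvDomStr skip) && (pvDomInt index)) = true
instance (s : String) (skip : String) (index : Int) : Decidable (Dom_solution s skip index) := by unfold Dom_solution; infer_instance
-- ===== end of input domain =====

-- B replaces A's letter-by-letter counting loop (O(index) per character) by one 26-letter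
-- cyclic window per character indexed directly with (index-1) % len(window).

-- ===== PORT A =====
def pvAlpha : List Char := "abcdefghijklmnopqrstuvwxyz".toList

-- the 'while len(a_list) < index' loop; fuel only makes the loop total (under Pre_ it suffices)
def pvLoopA (skipL : List Char) (index : Int) : Nat → Int → List Char → List Char
  | 0, _, aList => aList
  | fuel+1, idx, aList =>
    if (aList.length : Int) < index then
      let c := PySem.List.pyGetD pvAlpha (PySem.Int.mod idx 26) ' '   -- alpha[idx % 26], always in range
      pvLoopA skipL index fuel (idx + 1) (if c ∈ skipL then aList else aList ++ [c])
    else aList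

-- loop body of 'for ch in s'
def pvStepA (skipL : List Char) (index : Int) (answer : List Char) (ch : Char) : List Char :=
  match PySem.List.index? pvAlpha ch with
  | none => answer          -- alpha.index(ch) raises ValueError: excluded by Pre_
  | some p =>
    let aList := pvLoopA skipL index (26 * index).toNat ((p : Int) + 1) []
    match PySem.List.pyGet? aList (-1) with
    | some c => answer ++ [c]
    | none => answer        -- a_list[-1] raises IndexError (index <= 0): excluded by Pre_

def solution (s : String) (skip : String) (index : Int) : String :=
  String.ofList (s.toList.foldl (pvStepA skip.toList index) [])

-- ===== PORT B =====
-- loop body of 'for ch in s'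
def pvStepB (skipSet : PySem.Set Char) (index : Int) (out : List Char) (ch : Char) : List Char :=
  match PySem.List.index? pvAlpha ch with
  | none => out             -- alpha.index(ch) raises ValueError: excluded by Pre_
  | some p =>
    let cyc := (PySem.List.pyRange 1 27 1).filterMap (fun j =>
      let c := PySem.List.pyGetD pvAlpha (PySem.Int.mod ((p : Int) + j) 26) ' '
      if PySem.Set.contains skipSet c then none else some c)
    match PySem.List.pyGet? cyc (PySem.Int.mod (index - 1) (cyc.length : Int)) with
    | some c => out ++ [c]
    | none => out           -- cyc empty (ZeroDivisionError) or index <= 0: excluded by Pre_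

def solution_alt (s : String) (skip : String) (index : Int) : String :=
  let skipSet : PySem.Set Char := PySem.Set.ofList skip.toList
  String.ofList (s.toList.foldl (pvStepB skipSet index) [])

-- ===== PRECONDITION & SPEC =====
-- Pre_ excludes inputs where A raises or diverges: a character of s outside 'a'..'z'
-- (ValueError from alpha.index), and — for nonempty s — index < 1 (IndexError on a_list[-1])
-- or skip containing all 26 letters (the while loop never terminates).
def Pre_solution (s : String) (skip : String) (index : Int) : Prop :=
  s.toList.all (fun c => pvAlpha.contains c) = true ∧
  (s = "" ∨ (1 ≤ index ∧ pvAlpha.any (fun c => !(skip.toList.contains c)) = true))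
instance (s : String) (skip : String) (index : Int) : Decidable (Pre_solution s skip index) := by
  unfold Pre_solution; infer_instance

def pvWitness_solution : String × String × Int := ("aybabtu", "bcu", 7)

def Spec_solution (s : String) (skip : String) (index : Int) (out : String) : Prop := out = solution_alt s skip index
instance (s : String) (skip : String) (index : Int) (out : String) : Decidable (Spec_solution s skip index out) := by unfold Spec_solution; infer_instance

-- ===== CLAIM (what is proved, stated in full; the proofs are below) =====
def Claim_equal_solution : Prop := ∀ (s : String) (skip : String) (index : Int), Dom_solution s skip index → Pre_solution s skip index → Spec_solution s skip index (solution s skip index)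

-- ===== LEMMAS AND PROOFS =====

-- letter at cyclic position idx, and 'is not skipped' test
def pvLetter (idx : Int) : Char := PySem.List.pyGetD pvAlpha (PySem.Int.mod idx 26) ' '
def pvNs (skipL : List Char) (idx : Int) : Bool := !(decide (pvLetter idx ∈ skipL))

-- the letters appended by A's loop: t more letters wanted, scanning from idx
def pvEmit (skipL : List Char) : Nat → Int → Int → List Char
  | 0, _, _ => []
  | f+1, t, idx =>
    if 0 < t then
      (if pvNs skipL idx then pvLetter idx :: pvEmit skipL f (t-1) (idx+1)
       else pvEmit skipL f t (idx+1))
    else []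

-- the non-skipped letters among positions idx, idx+1, …, idx+n-1
def pvWin (skipL : List Char) : Nat → Int → List Char
  | 0, _ => []
  | n+1, idx => (if pvNs skipL idx then [pvLetter idx] else []) ++ pvWin skipL n (idx + 1)

-- first t letters of the cyclic repetition of w
def pvTakeCyc (t : Nat) (w : List Char) : List Char :=
  (List.range t).map (fun k => w.getD (k % w.length) ' ')

theorem pvLoopA_eq_emit (skipL : List Char) (index : Int) :
    ∀ (fuel : Nat) (idx : Int) (aList : List Char),
      pvLoopA skipL index fuel idx aList
        = aList ++ pvEmit skipL fuel (index - aList.length) idx := by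
  intro fuel
  induction fuel with
  | zero => intro idx aList; simp [pvLoopA, pvEmit]
  | succ f ih =>
    intro idx aList
    have hmod : PySem.Int.mod idx 26 = idx % 26 :=
      PySem.Int.mod_eq_emod_of_pos (by norm_num : (0:Int) < 26)
    have hlet : pvLetter idx = PySem.List.pyGetD pvAlpha (idx % 26) ' ' := by
      rw [pvLetter, hmod]
    by_cases h : (aList.length : Int) < index
    · have h0 : (0:Int) < index - aList.length := by omega
      simp only [pvLoopA, pvEmit, if_pos h, if_pos h0, hmod]
      by_cases hc : PySem.List.pyGetD pvAlpha (idx % 26) ' ' ∈ skipL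
      · have hns : pvNs skipL idx = false := by rw [pvNs, hlet]; simp [hc]
        rw [if_pos hc, hns]
        simp only [Bool.false_eq_true, if_false]
        exact ih _ _
      · have hns : pvNs skipL idx = true := by rw [pvNs, hlet]; simp [hc]
        rw [if_neg hc, hns]
        simp only [if_true]
        rw [ih, List.append_assoc, List.singleton_append]
        have harg : index - ((aList ++ [PySem.List.pyGetD pvAlpha (idx % 26) ' ']).length : Int)
            = index - (aList.length : Int) - 1 := by
          simp only [List.length_append, List.length_cons, List.length_nil]
          push_cast
          ring
        rw [harg, hlet]
    · simp [pvLoopA, pvEmit, if_neg h]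

theorem pvLetter_period (idx : Int) : pvLetter (idx + 26) = pvLetter idx := by
  unfold pvLetter
  rw [PySem.Int.mod_eq_emod_of_pos (by norm_num : (0:Int) < 26),
      PySem.Int.mod_eq_emod_of_pos (by norm_num : (0:Int) < 26)]
  congr 1
  omega

theorem pvNs_period (skipL : List Char) (idx : Int) : pvNs skipL (idx + 26) = pvNs skipL idx := by
  simp [pvNs, pvLetter_period]

theorem pvWin_append (skipL : List Char) :
    ∀ (a b : Nat) (idx : Int),
      pvWin skipL (a + b) idx = pvWin skipL a idx ++ pvWin skipL b (idx + a) := by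
  intro a
  induction a with
  | zero => intro b idx; simp [pvWin]
  | succ a ih =>
    intro b idx
    have : a + 1 + b = (a + b) + 1 := by omega
    rw [this]
    show (if pvNs skipL idx then [pvLetter idx] else []) ++ pvWin skipL (a + b) (idx + 1)
        = ((if pvNs skipL idx then [pvLetter idx] else []) ++ pvWin skipL a (idx + 1)) ++ _
    rw [ih, List.append_assoc]
    congr 3
    push_cast; ring

theorem pvWin_period (skipL : List Char) :
    ∀ (n : Nat) (idx : Int), pvWin skipL n (idx + 26) = pvWin skipL n idx := by
  intro n
  induction n with
  | zero => intro idx; simp [pvWin]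
  | succ n ih =>
    intro idx
    show (if pvNs skipL (idx + 26) then [pvLetter (idx + 26)] else []) ++ pvWin skipL n (idx + 26 + 1)
        = (if pvNs skipL idx then [pvLetter idx] else []) ++ pvWin skipL n (idx + 1)
    rw [pvNs_period, pvLetter_period, (by ring : idx + 26 + 1 = idx + 1 + 26), ih]

theorem pvWin26_succ (skipL : List Char) (idx : Int) :
    pvWin skipL 26 (idx + 1)
      = pvWin skipL 25 (idx + 1) ++ (if pvNs skipL idx then [pvLetter idx] else []) := by
  have h := pvWin_append skipL 25 1 (idx + 1)
  norm_num at h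
  rw [h, (by ring : idx + 1 + 25 = idx + 26)]
  congr 1
  have := pvWin_period skipL 1 idx
  rw [this]
  simp [pvWin]

theorem pvGetD_rot (c : Char) (w : List Char) (k : Nat) :
    (c :: w).getD ((k + 1) % (c :: w).length) ' ' = (w ++ [c]).getD (k % (w ++ [c]).length) ' ' := by
  match w with
  | [] => simp [Nat.mod_one]
  | x :: xs =>
    have hm : (c :: x :: xs).length = xs.length + 2 := by simp
    have hm2 : ((x :: xs) ++ [c]).length = xs.length + 2 := by simp
    rw [hm, hm2]
    have hj : k % (xs.length + 2) < xs.length + 2 := Nat.mod_lt _ (by omega)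
    have hone : 1 % (xs.length + 2) = 1 := Nat.mod_eq_of_lt (by omega)
    have hstep : (k + 1) % (xs.length + 2) = (k % (xs.length + 2) + 1) % (xs.length + 2) := by
      conv_lhs => rw [Nat.add_mod, hone]
    by_cases hcase : k % (xs.length + 2) = xs.length + 1
    · have h0 : (k + 1) % (xs.length + 2) = 0 := by
        rw [hstep, hcase, Nat.mod_self]
      rw [h0, hcase]
      show c = ((x :: xs) ++ [c]).getD (x :: xs).length ' '
      rw [List.getD_eq_getElem?_getD, List.getElem?_concat_length]
      rfl
    · have hlt : k % (xs.length + 2) < xs.length + 1 := by omega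
      have h1 : (k + 1) % (xs.length + 2) = k % (xs.length + 2) + 1 := by
        rw [hstep, Nat.mod_eq_of_lt (by omega)]
      rw [h1, List.getD_cons_succ, List.getD_eq_getElem?_getD, List.getD_eq_getElem?_getD,
          List.getElem?_append_left (by simpa using hlt)]

theorem pvTakeCyc_rot (t : Nat) (c : Char) (w : List Char) :
    pvTakeCyc (t + 1) (c :: w) = c :: pvTakeCyc t (w ++ [c]) := by
  unfold pvTakeCyc
  rw [List.range_succ_eq_map]
  simp only [List.map_cons, List.map_map]
  congr 1
  simp only [List.map_inj_left, Function.comp, List.mem_range]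
  intro k _
  have h := pvGetD_rot c w k
  simpa [List.getD_eq_getElem?_getD] using h

theorem pvWin_filterMap (skipL : List Char) :
    ∀ (n : Nat) (idx : Int),
      pvWin skipL n idx = (List.range n).filterMap
        (fun j : Nat => if pvNs skipL (idx + j) then some (pvLetter (idx + j)) else none) := by
  intro n
  induction n with
  | zero => intro idx; simp [pvWin]
  | succ n ih =>
    intro idx
    rw [List.range_succ_eq_map, List.filterMap_cons, List.filterMap_map]
    have hcong := List.filterMap_congr (l := List.range n)
      (f := (fun j : Nat => if pvNs skipL (idx + j) then some (pvLetter (idx + j)) else none) ∘ Nat.succ)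
      (g := fun j : Nat => if pvNs skipL ((idx + 1) + j) then some (pvLetter ((idx + 1) + j)) else none)
      (by
        intro j _
        simp only [Function.comp]
        have h1 : idx + ((j + 1 : Nat) : Int) = (idx + 1) + (j : Int) := by push_cast; ring
        rw [show (Nat.succ j) = j + 1 from rfl, h1])
    rw [hcong, ← ih]
    show pvWin skipL (n + 1) idx = _
    rw [show pvWin skipL (n + 1) idx
        = (if pvNs skipL idx then [pvLetter idx] else []) ++ pvWin skipL n (idx + 1) from rfl]
    have h0 : idx + ((0 : Nat) : Int) = idx := by simp
    rw [h0]
    by_cases hns : pvNs skipL idx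
    · rw [if_pos hns, if_pos hns, List.singleton_append]
    · rw [if_neg hns, if_neg hns, List.nil_append]

theorem pvWin26_ne_nil (skipL : List Char) {idx : Int}
    (h : ∃ k : Nat, k < 26 ∧ pvNs skipL (idx + k) = true) : pvWin skipL 26 idx ≠ [] := by
  obtain ⟨k, hk, hns⟩ := h
  rw [pvWin_filterMap]
  intro hnil
  have hmem : pvLetter (idx + k) ∈ (List.range 26).filterMap
      (fun j : Nat => if pvNs skipL (idx + j) then some (pvLetter (idx + j)) else none) :=
    List.mem_filterMap.mpr ⟨k, List.mem_range.mpr hk, by rw [if_pos hns]⟩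
  rw [hnil] at hmem
  exact absurd hmem List.not_mem_nil

theorem pvAlpha_length : pvAlpha.length = 26 := by decide

theorem pvExists_hit (skipL : List Char) (hglob : ∃ c ∈ pvAlpha, c ∉ skipL) :
    ∀ idx : Int, ∃ k : Nat, k < 26 ∧ pvNs skipL (idx + k) = true := by
  intro idx
  obtain ⟨c, hc, hcs⟩ := hglob
  obtain ⟨r, hr, hget⟩ := List.mem_iff_getElem.mp hc
  have hr26 : r < 26 := by rw [pvAlpha_length] at hr; exact hr
  refine ⟨(((r : Int) - idx) % 26).toNat, ?_, ?_⟩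
  · have h1 : 0 ≤ ((r : Int) - idx) % 26 := Int.emod_nonneg _ (by norm_num)
    have h2 : ((r : Int) - idx) % 26 < 26 := Int.emod_lt_of_pos _ (by norm_num)
    omega
  · have harg : (idx + ((((r : Int) - idx) % 26).toNat : Int)) % 26 = (r : Int) := by omega
    rw [pvNs, pvLetter, PySem.Int.mod_eq_emod_of_pos (by norm_num : (0:Int) < 26), harg]
    have hgd : PySem.List.pyGetD pvAlpha ((r : Nat) : Int) ' ' = pvAlpha.getD r ' ' := by
      simp
    rw [hgd, List.getD_eq_getElem?_getD, List.getElem?_eq_getElem hr, Option.getD_some, hget]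
    simp [hcs]

theorem pvEmit_spec (skipL : List Char)
    (hglob : ∀ idx : Int, ∃ k : Nat, k < 26 ∧ pvNs skipL (idx + k) = true) :
    ∀ (t : Nat) (idx : Int) (fuel : Nat), 26 * t ≤ fuel →
      pvEmit skipL fuel (t : Int) idx = pvTakeCyc t (pvWin skipL 26 idx) := by
  intro t
  induction t with
  | zero =>
    intro idx fuel _
    cases fuel with
    | zero => simp [pvEmit, pvTakeCyc]
    | succ f => simp [pvEmit, pvTakeCyc]
  | succ t ih =>
    have aux : ∀ k : Nat, ∀ idx : Int, ∀ fuel : Nat,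
        (∀ j : Nat, j < k → pvNs skipL (idx + j) = false) →
        pvNs skipL (idx + k) = true →
        k + 1 + 26 * t ≤ fuel →
        pvEmit skipL fuel ((t : Int) + 1) idx = pvTakeCyc (t + 1) (pvWin skipL 26 idx) := by
      intro k
      induction k with
      | zero =>
        intro idx fuel _ hns hf
        obtain ⟨f, rfl⟩ : ∃ f, fuel = f + 1 := ⟨fuel - 1, by omega⟩
        have hns' : pvNs skipL idx = true := by
          have h0 : idx + ((0 : Nat) : Int) = idx := by simp
          rw [h0] at hns; exact hns
        simp only [pvEmit, if_pos (by positivity : (0:Int) < (t : Int) + 1), hns', if_true]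
        rw [show (t : Int) + 1 - 1 = (t : Int) from by ring]
        rw [ih (idx + 1) f (by omega)]
        rw [show pvWin skipL 26 idx
            = (if pvNs skipL idx then [pvLetter idx] else []) ++ pvWin skipL 25 (idx + 1) from rfl,
            if_pos hns', List.singleton_append]
        rw [pvWin26_succ skipL idx, if_pos hns']
        exact (pvTakeCyc_rot t (pvLetter idx) (pvWin skipL 25 (idx + 1))).symm
      | succ k ihk =>
        intro idx fuel hbefore hns hf
        obtain ⟨f, rfl⟩ : ∃ f, fuel = f + 1 := ⟨fuel - 1, by omega⟩
        have hns0 : pvNs skipL idx = false := by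
          have h := hbefore 0 (by omega)
          have h0 : idx + ((0 : Nat) : Int) = idx := by simp
          rw [h0] at h; exact h
        simp only [pvEmit, if_pos (by positivity : (0:Int) < (t : Int) + 1), hns0,
          Bool.false_eq_true, if_false]
        have hwin : pvWin skipL 26 (idx + 1) = pvWin skipL 26 idx := by
          rw [pvWin26_succ skipL idx, if_neg (by simp [hns0]), List.append_nil]
          rw [show pvWin skipL 26 idx
              = (if pvNs skipL idx then [pvLetter idx] else []) ++ pvWin skipL 25 (idx + 1) from rfl,
              if_neg (by simp [hns0]), List.nil_append]
        rw [ihk (idx + 1) f ?_ ?_ (by omega), hwin]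
        · intro j hj
          have h := hbefore (j + 1) (by omega)
          have harg : idx + ((j + 1 : Nat) : Int) = (idx + 1) + (j : Int) := by push_cast; ring
          rw [harg] at h; exact h
        · have harg : idx + ((k + 1 : Nat) : Int) = (idx + 1) + (k : Int) := by push_cast; ring
          rw [harg] at hns; exact hns
    intro idx fuel hf
    obtain ⟨k0, hk0, hns0⟩ := hglob idx
    have hex : ∃ k : Nat, pvNs skipL (idx + k) = true := ⟨k0, hns0⟩
    have hk26 : Nat.find hex < 26 := lt_of_le_of_lt (Nat.find_min' hex hns0) hk0
    have hc : ((t + 1 : Nat) : Int) = (t : Int) + 1 := by push_cast; ring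
    rw [hc]
    exact aux (Nat.find hex) idx fuel
      (fun j hj => by
        have h := Nat.find_min hex hj
        simpa using h)
      (Nat.find_spec hex)
      (by omega)

theorem pvTakeCyc_last (t : Nat) (w : List Char) (ht : 0 < t) :
    PySem.List.pyGet? (pvTakeCyc t w) (-1) = some (w.getD ((t - 1) % w.length) ' ') := by
  obtain ⟨t', rfl⟩ : ∃ t', t = t' + 1 := ⟨t - 1, by omega⟩
  unfold pvTakeCyc
  rw [List.range_succ, List.map_append, List.map_singleton,
      PySem.List.pyGet?_neg_one_append_singleton]
  simp

theorem pvCyc_eq_win (skipL : List Char) (skipSet : PySem.Set Char)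
    (hset : ∀ c : Char, PySem.Set.contains skipSet c = decide (c ∈ skipL))
    (p : Nat) :
    (PySem.List.pyRange 1 27 1).filterMap (fun j =>
      let c := PySem.List.pyGetD pvAlpha (PySem.Int.mod ((p : Int) + j) 26) ' '
      if PySem.Set.contains skipSet c then none else some c)
      = pvWin skipL 26 ((p : Int) + 1) := by
  rw [PySem.List.pyRange_one]
  rw [show ((27 : Int) - 1).toNat = 26 from by decide]
  rw [List.filterMap_map, pvWin_filterMap]
  apply List.filterMap_congr
  intro j _
  simp only [Function.comp]
  have harg : (p : Int) + (1 + (j : Int)) = ((p : Int) + 1) + (j : Int) := by ring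
  rw [harg, hset]
  rw [pvNs, pvLetter]
  by_cases hmem : PySem.List.pyGetD pvAlpha (PySem.Int.mod (((p : Int) + 1) + (j : Int)) 26) ' ' ∈ skipL
  · rw [if_pos (by simpa using hmem), if_neg (by simpa using hmem)]
  · rw [if_neg (by simpa using hmem), if_pos (by simpa using hmem)]

-- per-character equality
theorem pvStep_eq (skipL : List Char) (skipSet : PySem.Set Char)
    (hset : ∀ c : Char, PySem.Set.contains skipSet c = decide (c ∈ skipL))
    (index : Int) (hidx : 1 ≤ index)
    (hglob : ∃ c ∈ pvAlpha, c ∉ skipL)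
    (acc : List Char) (ch : Char) :
    pvStepA skipL index acc ch = pvStepB skipSet index acc ch := by
  cases hp : PySem.List.index? pvAlpha ch with
  | none => simp only [pvStepA, pvStepB, hp]
  | some p =>
    simp only [pvStepA, pvStepB, hp]
    have hhit := pvExists_hit skipL hglob
    have hwne : pvWin skipL 26 ((p : Int) + 1) ≠ [] := pvWin26_ne_nil skipL (hhit _)
    set w : List Char := pvWin skipL 26 ((p : Int) + 1) with hw
    set t : Nat := index.toNat with ht
    have hm : 0 < w.length := List.length_pos_iff.mpr hwne
    have hA : pvLoopA skipL index (26 * index).toNat ((p : Int) + 1) [] = pvTakeCyc t w := by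
      rw [pvLoopA_eq_emit]
      rw [show index - (([] : List Char).length : Int) = ((t : Nat) : Int) from by simp; omega]
      rw [pvEmit_spec skipL hhit t _ _ (by omega)]
      rw [List.nil_append]
    rw [hA, pvTakeCyc_last t w (by omega)]
    rw [pvCyc_eq_win skipL skipSet hset p, ← hw]
    have hmod2 : PySem.Int.mod (index - 1) ((w.length : Nat) : Int) = (((t - 1) % w.length : Nat) : Int) := by
      rw [PySem.Int.mod_eq_emod_of_pos (by exact_mod_cast hm)]
      rw [show index - 1 = ((t - 1 : Nat) : Int) from by omega]
      exact (Int.natCast_mod _ _).symm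
    rw [hmod2, PySem.List.pyGet?_natCast,
        List.getElem?_eq_getElem (Nat.mod_lt _ hm)]
    rw [List.getD_eq_getElem?_getD, List.getElem?_eq_getElem (Nat.mod_lt _ hm), Option.getD_some]

-- ===== VERDICT (by name: the statement is the Claim_ definition above) =====
theorem solution_spec : Claim_equal_solution := by
  unfold Claim_equal_solution
  intro s skip index _ hpre
  unfold Spec_solution solution solution_alt
  obtain ⟨hchars, hrest⟩ := hpre
  rcases hrest with rfl | ⟨hidx, hglobB⟩
  · rfl
  · have hglob : ∃ c ∈ pvAlpha, c ∉ skip.toList := by simpa using hglobB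
    have hset : ∀ c : Char, PySem.Set.contains (PySem.Set.ofList skip.toList) c
        = decide (c ∈ skip.toList) := by
      intro c
      by_cases h : c ∈ skip.toList
      · simp [h]
      · simp only [h, decide_false]
        rw [Bool.eq_false_iff]
        intro hc
        exact h ((PySem.Set.mem_ofList _ _).mp ((PySem.Set.contains_iff _ _).mp hc))
    have hfun : pvStepA skip.toList index = pvStepB (PySem.Set.ofList skip.toList) index := by
      funext acc ch
      exact pvStep_eq skip.toList _ hset index hidx hglob acc ch
    rw [hfun]
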